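-- pv_equiv track=rewrite | github.com/jce77/EZFolderBackup | src/scripts/files.py | move_index_in_dict
-- ===== SOURCE A (Python) =====
-- def move_index_in_dict(list, dict_key, moving_upwards):
--     """ Moves the key in the dictionary forwards or backwards in the order """
--     count = 0
--     values = []
--     if moving_upwards:  # moving upwards
--         for key in list:
--             values.append([key, list[key]])
--             if key == dict_key:
--                 # cant move up past 0
--                 if count == 0:
--                     return list
--                 value_above = values[count - 1]
--                 values[count - 1] = values[count]
--                 values[count] = value_above
--             count += 1
--     else:  # moving downwards
--         switch_with_previous = False
--         for key in list:
--             values.append([key, list[key]])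
--             if key == dict_key:
--                 # cant move down past the last value
--                 if count == (len(list) - 1):
--                     return list
--                 switch_with_previous = True
--             elif switch_with_previous:
--                 value_above = values[count - 1]
--                 values[count - 1] = values[count]
--                 values[count] = value_above
--                 switch_with_previous = False
--             count += 1
--     new_dict = {}
--     for tuple in values:
--         new_dict[tuple[0]] = tuple[1]
--     return new_dict
-- ===== SOURCE B (Python) =====
-- def move_index_in_dict(list, dict_key, moving_upwards):
--     """ Moves the key in the dictionary forwards or backwards in the order
--     (locate-then-swap-then-rebuild instead of A's fused scan with a flag) """
--     keys = [k for k in list]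
--     if dict_key in keys:
--         i = keys.index(dict_key)
--         if moving_upwards:
--             if i == 0:
--                 return list
--             keys[i - 1], keys[i] = keys[i], keys[i - 1]
--         else:
--             if i == len(keys) - 1:
--                 return list
--             keys[i], keys[i + 1] = keys[i + 1], keys[i]
--     return {k: list[k] for k in keys}
-- ===== Notes on version B (the rewrite author's own statement) =====
-- stated objective: simpler
-- what changed: Replaces A's fused single-pass scan with in-loop swap bookkeeping and a trailing flag by a plain decomposition: list the keys, locate the key with index, swap the two neighbouring keys, rebuild the dict by one comprehension.
import Mathlib
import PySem

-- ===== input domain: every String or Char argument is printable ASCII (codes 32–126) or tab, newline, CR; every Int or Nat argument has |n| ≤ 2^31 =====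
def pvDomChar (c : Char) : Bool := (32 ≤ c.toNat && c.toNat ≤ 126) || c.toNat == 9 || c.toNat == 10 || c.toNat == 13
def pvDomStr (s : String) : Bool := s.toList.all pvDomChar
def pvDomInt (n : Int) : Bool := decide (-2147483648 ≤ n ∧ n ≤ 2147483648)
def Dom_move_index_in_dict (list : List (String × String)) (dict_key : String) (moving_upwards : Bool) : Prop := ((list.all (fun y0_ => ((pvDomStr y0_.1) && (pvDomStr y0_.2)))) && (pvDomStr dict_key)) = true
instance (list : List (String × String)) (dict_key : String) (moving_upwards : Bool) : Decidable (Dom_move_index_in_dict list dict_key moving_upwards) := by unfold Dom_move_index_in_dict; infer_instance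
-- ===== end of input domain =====

-- B replaces A's fused scan-with-flag by locate / swap-neighbouring-keys / rebuild (objective: simpler).

-- ===== PORT A =====
-- A's upwards loop: acc is A's `values` list in REVERSE, count is A's counter; `none` = A's early `return list`.
-- The `[] => none` branch of the inner match is unreachable (count ≠ 0 implies acc ≠ []).
def pvAUp (d : PySem.Dict String String) (dict_key : String) :
    List (String × String) → Nat → List (String × String) → Option (List (String × String))
  | [], _, acc => some acc.reverse
  | (k, _) :: rest, count, acc =>
    if k = dict_key then
      if count = 0 then none
      else
        match acc with
        | b :: t => pvAUp d dict_key rest (count + 1) (b :: (k, PySem.Dict.getD d k "") :: t)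
        | [] => none
    else pvAUp d dict_key rest (count + 1) ((k, PySem.Dict.getD d k "") :: acc)

-- A's downwards loop: n = len(list), flag is `switch_with_previous`; the `[] => …` arm of the
-- inner match is unreachable (flag set implies acc ≠ []).
def pvADown (d : PySem.Dict String String) (dict_key : String) (n : Nat) :
    List (String × String) → Nat → Bool → List (String × String) → Option (List (String × String))
  | [], _, _, acc => some acc.reverse
  | (k, _) :: rest, count, flag, acc =>
    if k = dict_key then
      if count = n - 1 then none
      else pvADown d dict_key n rest (count + 1) true ((k, PySem.Dict.getD d k "") :: acc)
    else if flag then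
      match acc with
      | b :: t => pvADown d dict_key n rest (count + 1) false (b :: (k, PySem.Dict.getD d k "") :: t)
      | [] => pvADown d dict_key n rest (count + 1) false ((k, PySem.Dict.getD d k "") :: acc)
    else pvADown d dict_key n rest (count + 1) false ((k, PySem.Dict.getD d k "") :: acc)

def move_index_in_dict (list : List (String × String)) (dict_key : String) (moving_upwards : Bool) : List (String × String) :=
  let d := PySem.Dict.mk list
  match (if moving_upwards then pvAUp d dict_key list 0 []
         else pvADown d dict_key list.length list 0 false []) with
  | none => list
  | some values => (values.foldl (fun nd p => PySem.Dict.insert nd p.1 p.2) PySem.Dict.empty).items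

-- ===== PORT B =====
-- {k: list[k] for k in ks}; the lookup can never raise (every k comes from list's keys)
def pvBRebuild (list : List (String × String)) (ks : List String) : List (String × String) :=
  ks.map (fun k => (k, PySem.Dict.getD (PySem.Dict.mk list) k ""))

def move_index_in_dict_alt (list : List (String × String)) (dict_key : String) (moving_upwards : Bool) : List (String × String) :=
  let keys := list.map Prod.fst
  match PySem.List.index? keys dict_key with
  | none => pvBRebuild list keys
  | some i =>
    if moving_upwards then
      if i = 0 then list
      else pvBRebuild list ((keys.set (i - 1) (keys.getD i "")).set i (keys.getD (i - 1) ""))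
    else
      if i = keys.length - 1 then list
      else pvBRebuild list ((keys.set i (keys.getD (i + 1) "")).set (i + 1) (keys.getD i ""))

-- ===== PRECONDITION & SPEC =====
-- Pre_ excludes association lists with duplicate keys: A's parameter is a Python dict, which cannot
-- contain two equal keys, so such lists represent no input A is ever called on.
def Pre_move_index_in_dict (list : List (String × String)) (dict_key : String) (moving_upwards : Bool) : Prop :=
  (list.map Prod.fst).Nodup
instance (list : List (String × String)) (dict_key : String) (moving_upwards : Bool) : Decidable (Pre_move_index_in_dict list dict_key moving_upwards) := by unfold Pre_move_index_in_dict; infer_instance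

def pvWitness_move_index_in_dict : (List (String × String)) × String × Bool :=
  ([("a", "1"), ("b", "2"), ("c", "3")], "b", true)

def Spec_move_index_in_dict (list : List (String × String)) (dict_key : String) (moving_upwards : Bool) (out : List (String × String)) : Prop := out = move_index_in_dict_alt list dict_key moving_upwards
instance (list : List (String × String)) (dict_key : String) (moving_upwards : Bool) (out : List (String × String)) : Decidable (Spec_move_index_in_dict list dict_key moving_upwards out) := by unfold Spec_move_index_in_dict; infer_instance

-- ===== CLAIM (what is proved, stated in full; the proofs are below) =====
def Claim_equal_move_index_in_dict : Prop := ∀ (list : List (String × String)) (dict_key : String) (moving_upwards : Bool), Dom_move_index_in_dict list dict_key moving_upwards → Pre_move_index_in_dict list dict_key moving_upwards → Spec_move_index_in_dict list dict_key moving_upwards (move_index_in_dict list dict_key moving_upwards)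

-- ===== LEMMAS AND PROOFS =====
-- with nodup keys, looking a key of the dict up returns that pair's own value
theorem pv_getD_self (list : List (String × String)) (h : (list.map Prod.fst).Nodup)
    (p : String × String) (hp : p ∈ list) :
    PySem.Dict.getD (PySem.Dict.mk list) p.1 "" = p.2 :=
  PySem.Dict.getD_of_mem_items _ hp (by simpa using h) ""

-- rebuilding a dict by inserting pairs with fresh, pairwise distinct keys appends them to the items
theorem pv_rebuild_aux (values : List (String × String)) :
    ∀ (d : PySem.Dict String String), (d.keys ++ values.map Prod.fst).Nodup →
    (values.foldl (fun nd p => PySem.Dict.insert nd p.1 p.2) d).items = d.items ++ values := by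
  induction values with
  | nil => intro d _; simp
  | cons p rest ih =>
    intro d h
    obtain ⟨h1, h2, hdisj⟩ := List.nodup_append.mp h
    have hmem : p.1 ∉ d.keys := fun hk => hdisj _ hk _ (by simp) rfl
    have hnc : PySem.Dict.contains d p.1 = false := by
      rw [Bool.eq_false_iff]
      intro hc
      exact hmem ((PySem.Dict.contains_iff_mem_keys d p.1).mp hc)
    have hkeys : (PySem.Dict.insert d p.1 p.2).keys = d.keys ++ [p.1] :=
      PySem.Dict.keys_insert_of_not_contains d p.2 hnc
    have hitems : (PySem.Dict.insert d p.1 p.2).items = d.items ++ [(p.1, p.2)] :=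
      PySem.Dict.items_insert_of_not_contains d p.2 hnc
    have hnd : ((PySem.Dict.insert d p.1 p.2).keys ++ rest.map Prod.fst).Nodup := by
      rw [hkeys]
      have he : d.keys ++ List.map Prod.fst (p :: rest) = (d.keys ++ [p.1]) ++ rest.map Prod.fst := by
        simp
      rw [he] at h
      exact h
    calc ((p :: rest).foldl (fun nd q => PySem.Dict.insert nd q.1 q.2) d).items
        = (rest.foldl (fun nd q => PySem.Dict.insert nd q.1 q.2) (PySem.Dict.insert d p.1 p.2)).items := by
          simp [List.foldl]
      _ = (PySem.Dict.insert d p.1 p.2).items ++ rest := ih _ hnd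
      _ = d.items ++ p :: rest := by simp [hitems]

theorem pv_rebuild_dict (values : List (String × String)) (h : (values.map Prod.fst).Nodup) :
    (values.foldl (fun nd p => PySem.Dict.insert nd p.1 p.2) PySem.Dict.empty).items = values := by
  have := pv_rebuild_aux values PySem.Dict.empty (by simpa using h)
  simpa using this

-- skipping a prefix that does not contain dict_key (upwards loop)
theorem pv_up_skip (d : PySem.Dict String String) (dict_key : String)
    (pre : List (String × String)) (m : List (String × String)) :
    dict_key ∉ pre.map Prod.fst → (∀ p ∈ pre, PySem.Dict.getD d p.1 "" = p.2) →
    ∀ (count : Nat) (acc : List (String × String)),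
    pvAUp d dict_key (pre ++ m) count acc
      = pvAUp d dict_key m (count + pre.length) (pre.reverse ++ acc) := by
  induction pre with
  | nil => intro _ _ count acc; simp
  | cons p pre' ih =>
    intro hno hres count acc
    obtain ⟨k, v⟩ := p
    have hk : k ≠ dict_key := fun h => hno (by simp [h])
    have hv : PySem.Dict.getD d k "" = v := hres (k, v) (by simp)
    have hno' : dict_key ∉ pre'.map Prod.fst := fun h => hno (by simp [h])
    have hres' : ∀ p ∈ pre', PySem.Dict.getD d p.1 "" = p.2 := fun q hq => hres q (by simp [hq])
    simp only [List.cons_append, pvAUp, if_neg hk, hv]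
    rw [ih hno' hres' (count + 1) ((k, v) :: acc)]
    simp [List.reverse_cons, List.append_assoc, Nat.add_comm, Nat.add_left_comm]

-- skipping a prefix that does not contain dict_key with the flag down (downwards loop)
theorem pv_down_skip (d : PySem.Dict String String) (dict_key : String) (n : Nat)
    (pre : List (String × String)) (m : List (String × String)) :
    dict_key ∉ pre.map Prod.fst → (∀ p ∈ pre, PySem.Dict.getD d p.1 "" = p.2) →
    ∀ (count : Nat) (acc : List (String × String)),
    pvADown d dict_key n (pre ++ m) count false acc
      = pvADown d dict_key n m (count + pre.length) false (pre.reverse ++ acc) := by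
  induction pre with
  | nil => intro _ _ count acc; simp
  | cons p pre' ih =>
    intro hno hres count acc
    obtain ⟨k, v⟩ := p
    have hk : k ≠ dict_key := fun h => hno (by simp [h])
    have hv : PySem.Dict.getD d k "" = v := hres (k, v) (by simp)
    have hno' : dict_key ∉ pre'.map Prod.fst := fun h => hno (by simp [h])
    have hres' : ∀ p ∈ pre', PySem.Dict.getD d p.1 "" = p.2 := fun q hq => hres q (by simp [hq])
    simp only [List.cons_append, pvADown, if_neg hk, hv, Bool.false_eq_true, if_false]
    rw [ih hno' hres' (count + 1) ((k, v) :: acc)]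
    simp [List.reverse_cons, List.append_assoc, Nat.add_comm, Nat.add_left_comm]

-- rebuilding from the keys of a sublist of `list` reproduces the pairs
theorem pv_rebuild_keys (list : List (String × String)) (xs : List (String × String))
    (h : (list.map Prod.fst).Nodup) (hsub : ∀ p ∈ xs, p ∈ list) :
    pvBRebuild list (xs.map Prod.fst) = xs := by
  unfold pvBRebuild
  rw [List.map_map]
  have hc : ∀ p ∈ xs, ((fun k => (k, PySem.Dict.getD (PySem.Dict.mk list) k "")) ∘ Prod.fst) p = id p := by
    intro p hp
    have := pv_getD_self list h p (hsub p hp)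
    simp [this]
  rw [List.map_congr_left hc, List.map_id]

-- ===== VERDICT (by name: the statement is the Claim_ definition above) =====
theorem move_index_in_dict_spec : Claim_equal_move_index_in_dict := by
  intro list dict_key mu _hDom hPre
  have hnd : (list.map Prod.fst).Nodup := hPre
  have hres : ∀ p ∈ list, PySem.Dict.getD (PySem.Dict.mk list) p.1 "" = p.2 :=
    fun p hp => pv_getD_self list hnd p hp
  unfold Spec_move_index_in_dict
  simp only [move_index_in_dict, move_index_in_dict_alt]
  cases hidx : PySem.List.index? (list.map Prod.fst) dict_key with
  | none =>
    have hnm : dict_key ∉ list.map Prod.fst := (PySem.List.index?_eq_none_iff _ _).mp hidx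
    have hup : pvAUp (PySem.Dict.mk list) dict_key list 0 [] = some list := by
      have h := pv_up_skip (PySem.Dict.mk list) dict_key list [] hnm hres 0 []
      simp only [List.append_nil] at h
      rw [h]; simp [pvAUp]
    have hdown : pvADown (PySem.Dict.mk list) dict_key list.length list 0 false [] = some list := by
      have h := pv_down_skip (PySem.Dict.mk list) dict_key list.length list [] hnm hres 0 []
      simp only [List.append_nil] at h
      rw [h]; simp [pvADown]
    have hre : pvBRebuild list (list.map Prod.fst) = list :=
      pv_rebuild_keys list list hnd (fun p hp => hp)
    cases mu <;> simp [hup, hdown, hre, pv_rebuild_dict list hnd]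
  | some i =>
    obtain ⟨kpre, ksuf, hkeys, hlen, hkno⟩ := (PySem.List.index?_eq_some_iff _ _ _).mp hidx
    obtain ⟨pre, rest2, hsplit, hpremap, hrestmap⟩ := List.map_eq_append_iff.mp hkeys
    obtain ⟨pv, suf, hrest2, hpv1, hsufmap⟩ := List.map_eq_cons_iff.mp hrestmap
    obtain ⟨k1, v1⟩ := pv
    simp only at hpv1
    have hpv1' : dict_key = k1 := hpv1.symm
    subst hpv1'
    subst hrest2
    subst hsplit
    have hkd_pre : dict_key ∉ pre.map Prod.fst := by rw [hpremap]; exact hkno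
    have hnodup' : ((pre.map Prod.fst) ++ dict_key :: (suf.map Prod.fst)).Nodup := by
      simpa using hnd
    have hkd_suf : dict_key ∉ suf.map Prod.fst :=
      (List.nodup_cons.mp (List.nodup_append.mp hnodup').2.1).1
    have hres_pre : ∀ p ∈ pre, PySem.Dict.getD (PySem.Dict.mk (pre ++ (dict_key, v1) :: suf)) p.1 "" = p.2 :=
      fun p hp => hres p (by simp [hp])
    have hres_suf : ∀ p ∈ suf, PySem.Dict.getD (PySem.Dict.mk (pre ++ (dict_key, v1) :: suf)) p.1 "" = p.2 :=
      fun p hp => hres p (by simp [hp])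
    have hpvv : PySem.Dict.getD (PySem.Dict.mk (pre ++ (dict_key, v1) :: suf)) dict_key "" = v1 :=
      hres (dict_key, v1) (by simp)
    cases mu with
    | true =>
      rcases pre.eq_nil_or_concat with hpre0 | ⟨pre0, b, hpre⟩
      · -- key at position 0: A returns the original dict early, B returns list
        subst hpre0
        have hi : i = 0 := by rw [← hlen, ← hpremap]; rfl
        simp [pvAUp, hi]
      · rw [List.concat_eq_append] at hpre
        subst hpre
        have hi : i = pre0.length + 1 := by rw [← hlen, ← hpremap]; simp
        have hloop : pvAUp (PySem.Dict.mk ((pre0 ++ [b]) ++ (dict_key, v1) :: suf)) dict_key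
            ((pre0 ++ [b]) ++ (dict_key, v1) :: suf) 0 []
            = some (pre0 ++ (dict_key, v1) :: b :: suf) := by
          rw [pv_up_skip _ dict_key (pre0 ++ [b]) ((dict_key, v1) :: suf) hkd_pre hres_pre 0 []]
          have h2 := pv_up_skip (PySem.Dict.mk ((pre0 ++ [b]) ++ (dict_key, v1) :: suf)) dict_key
            suf [] hkd_suf hres_suf (0 + (pre0 ++ [b]).length + 1) (b :: (dict_key, v1) :: pre0.reverse)
          simp only [List.append_nil] at h2
          calc pvAUp (PySem.Dict.mk ((pre0 ++ [b]) ++ (dict_key, v1) :: suf)) dict_key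
                ((dict_key, v1) :: suf) (0 + (pre0 ++ [b]).length) ((pre0 ++ [b]).reverse ++ [])
              = pvAUp (PySem.Dict.mk ((pre0 ++ [b]) ++ (dict_key, v1) :: suf)) dict_key
                suf (0 + (pre0 ++ [b]).length + 1) (b :: (dict_key, v1) :: pre0.reverse) := by
                have hpvv2 : PySem.Dict.getD (PySem.Dict.mk (pre0 ++ b :: (dict_key, v1) :: suf)) dict_key "" = v1 := by
                  simpa using hpvv
                simp [pvAUp, hpvv2]
            _ = some (pre0 ++ (dict_key, v1) :: b :: suf) := by
                rw [h2]; simp [pvAUp]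
        have hnodup2 : ((pre0 ++ (dict_key, v1) :: b :: suf).map Prod.fst).Nodup := by
          have hperm : (b.1 :: dict_key :: suf.map Prod.fst).Perm (dict_key :: b.1 :: suf.map Prod.fst) :=
            List.Perm.swap dict_key b.1 (suf.map Prod.fst)
          have hperm2 := List.Perm.append_left (pre0.map Prod.fst) hperm
          have horig : (((pre0 ++ [b]) ++ (dict_key, v1) :: suf).map Prod.fst).Nodup := hnd
          have heq1 : ((pre0 ++ [b]) ++ (dict_key, v1) :: suf).map Prod.fst
              = pre0.map Prod.fst ++ b.1 :: dict_key :: suf.map Prod.fst := by simp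
          have heq2 : (pre0 ++ (dict_key, v1) :: b :: suf).map Prod.fst
              = pre0.map Prod.fst ++ dict_key :: b.1 :: suf.map Prod.fst := by simp
          rw [heq2]
      
          exact hperm2.nodup_iff.mp (heq1 ▸ horig)
        have hback : pre0.map Prod.fst ++ dict_key :: b.1 :: suf.map Prod.fst
            = (pre0 ++ (dict_key, v1) :: b :: suf).map Prod.fst := by simp
        have hBval : pvBRebuild (pre0 ++ b :: (dict_key, v1) :: suf)
            (pre0.map Prod.fst ++ dict_key :: b.1 :: suf.map Prod.fst)
            = pre0 ++ (dict_key, v1) :: b :: suf := by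
          rw [hback]
          refine pv_rebuild_keys _ _ (by simpa using hnd) ?_
          intro p hp
          simp only [List.mem_append, List.mem_cons] at hp ⊢
          tauto
        rw [hloop]
        refine Eq.trans (pv_rebuild_dict _ hnodup2) ?_
        simp [hi, hBval]
    | false =>
      cases suf with
      | nil =>
        -- key already last: A returns the original dict early, B returns list
        have hi : i = pre.length := by rw [← hlen, ← hpremap]; simp
        have hloop : pvADown (PySem.Dict.mk (pre ++ [(dict_key, v1)])) dict_key
            (pre ++ [(dict_key, v1)]).length (pre ++ [(dict_key, v1)]) 0 false [] = none := by
          have h := pv_down_skip (PySem.Dict.mk (pre ++ [(dict_key, v1)])) dict_key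
            (pre ++ [(dict_key, v1)]).length pre [(dict_key, v1)] hkd_pre hres_pre 0 []
          rw [h]
          simp [pvADown]
        rw [hloop]
        simp [hi]
      | cons c suf' =>
        have hi : i = pre.length := by rw [← hlen, ← hpremap]; simp
        have hkd_suf' : dict_key ∉ suf'.map Prod.fst := fun h => hkd_suf (by simp [h])
        have hc : c.1 ≠ dict_key := fun h => hkd_suf (by simp [h])
        have hcv : PySem.Dict.getD (PySem.Dict.mk (pre ++ (dict_key, v1) :: c :: suf')) c.1 "" = c.2 :=
          hres_suf c (by simp)
        have hres_suf'' : ∀ p ∈ suf', PySem.Dict.getD (PySem.Dict.mk (pre ++ (dict_key, v1) :: c :: suf')) p.1 "" = p.2 :=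
          fun p hp => hres_suf p (by simp [hp])
        have hloop : pvADown (PySem.Dict.mk (pre ++ (dict_key, v1) :: c :: suf')) dict_key
            (pre ++ (dict_key, v1) :: c :: suf').length (pre ++ (dict_key, v1) :: c :: suf') 0 false []
            = some (pre ++ c :: (dict_key, v1) :: suf') := by
          rw [pv_down_skip _ dict_key _ pre ((dict_key, v1) :: c :: suf') hkd_pre hres_pre 0 []]
          have h2 := pv_down_skip (PySem.Dict.mk (pre ++ (dict_key, v1) :: c :: suf')) dict_key
            (pre ++ (dict_key, v1) :: c :: suf').length suf' []
            hkd_suf' hres_suf'' (0 + pre.length + 1 + 1) ((dict_key, v1) :: c :: pre.reverse)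
          simp only [List.append_nil] at h2
          calc pvADown (PySem.Dict.mk (pre ++ (dict_key, v1) :: c :: suf')) dict_key
                (pre ++ (dict_key, v1) :: c :: suf').length ((dict_key, v1) :: c :: suf')
                (0 + pre.length) false (pre.reverse ++ [])
              = pvADown (PySem.Dict.mk (pre ++ (dict_key, v1) :: c :: suf')) dict_key
                (pre ++ (dict_key, v1) :: c :: suf').length suf'
                (0 + pre.length + 1 + 1) false ((dict_key, v1) :: c :: pre.reverse) := by
                simp [pvADown, hpvv, hcv, hc]
            _ = some (pre ++ c :: (dict_key, v1) :: suf') := by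
                rw [h2]; simp [pvADown]
        have hnodup2 : ((pre ++ c :: (dict_key, v1) :: suf').map Prod.fst).Nodup := by
          have hperm : (dict_key :: c.1 :: suf'.map Prod.fst).Perm (c.1 :: dict_key :: suf'.map Prod.fst) :=
            List.Perm.swap c.1 dict_key (suf'.map Prod.fst)
          have hperm2 := List.Perm.append_left (pre.map Prod.fst) hperm
          have horig : ((pre ++ (dict_key, v1) :: c :: suf').map Prod.fst).Nodup := hnd
          have heq1 : (pre ++ (dict_key, v1) :: c :: suf').map Prod.fst
              = pre.map Prod.fst ++ dict_key :: c.1 :: suf'.map Prod.fst := by simp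
          have heq2 : (pre ++ c :: (dict_key, v1) :: suf').map Prod.fst
              = pre.map Prod.fst ++ c.1 :: dict_key :: suf'.map Prod.fst := by simp
          rw [heq2]
          exact hperm2.nodup_iff.mp (heq1 ▸ horig)
        have hback : pre.map Prod.fst ++ c.1 :: dict_key :: suf'.map Prod.fst
            = (pre ++ c :: (dict_key, v1) :: suf').map Prod.fst := by simp
        have hBval : pvBRebuild (pre ++ (dict_key, v1) :: c :: suf')
            (pre.map Prod.fst ++ c.1 :: dict_key :: suf'.map Prod.fst)
            = pre ++ c :: (dict_key, v1) :: suf' := by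
          rw [hback]
          refine pv_rebuild_keys _ _ hnd ?_
          intro p hp
          simp only [List.mem_append, List.mem_cons] at hp ⊢
          tauto
        rw [hloop]
        refine Eq.trans (pv_rebuild_dict _ hnodup2) ?_
        simp [hi, hBval]
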